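-- pv_equiv track=rewrite | github.com/vecst/Euler | 44/44.py | petc
-- ===== SOURCE A (Python) =====
-- def pentl(n):
--     penl=(n*(3*n-1))//2
--     return(penl)
--
-- def petc(c,n):
--     t=1
--     a=pentl(n+1)
--     if c > a:
--         for t in range(1,c):
--             c -= (3*(n+1) +1)
--             if c == a:
--                 return(True)
--         return(False)
--     for t in range(1,c):
--         c += (3*t +1)
--         if c  ==a:
--             return(True)
--     return(False)
-- ===== SOURCE B (Python) =====
-- def petc(c, n):
--     # closed-form divisibility check for the subtract branch, binary search for the add branch
--     a = ((n + 1) * (3 * n + 2)) // 2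
--     if c > a:
--         d = 3 * n + 4
--         diff = c - a
--         return d > 0 and diff % d == 0 and diff // d <= c - 1
--     if c <= 1:
--         return False
--     target = 2 * (a - c)
--     lo, hi = 1, c - 1
--     while lo < hi:
--         mid = (lo + hi) // 2
--         if 3 * mid * mid + 5 * mid < target:
--             lo = mid + 1
--         else:
--             hi = mid
--     return 3 * lo * lo + 5 * lo == target
-- ===== Notes on version B (the rewrite author's own statement) =====
-- stated objective: faster
-- what changed: A scans up to c-1 steps adjusting c by a constant (subtract branch) or by 3t+1 (add branch); B replaces the subtract branch by a single divisibility/quotient check and the add branch by a binary search for the integer k with 3k^2+5k = 2(a-c).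
import Mathlib
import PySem

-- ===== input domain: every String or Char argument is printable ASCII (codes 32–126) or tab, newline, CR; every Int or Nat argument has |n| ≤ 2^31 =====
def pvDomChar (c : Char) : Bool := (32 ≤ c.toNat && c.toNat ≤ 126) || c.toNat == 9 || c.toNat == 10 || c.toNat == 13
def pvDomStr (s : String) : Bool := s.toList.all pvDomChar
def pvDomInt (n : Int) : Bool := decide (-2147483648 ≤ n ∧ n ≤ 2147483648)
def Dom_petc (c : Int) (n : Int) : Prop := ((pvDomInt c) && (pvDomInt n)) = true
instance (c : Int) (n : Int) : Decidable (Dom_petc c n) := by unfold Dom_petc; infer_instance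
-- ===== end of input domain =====

-- B replaces A's O(c) stepping loops by an O(log c) computation: a divisibility/quotient
-- check on the subtract branch and a binary search for the step count on the add branch.

-- ===== PORT A =====
def pentl (n : Int) : Int := PySem.Int.floordiv (n * (3 * n - 1)) 2

-- the 'for t in range(1,c): c -= step; if c == a: return True' loop (t itself unused)
def petcLoopSub (a step : Int) : List Int → Int → Bool
  | [], _ => false
  | _ :: ts, c =>
    let c' := c - step
    if c' = a then true else petcLoopSub a step ts c'

-- the 'for t in range(1,c): c += 3*t+1; if c == a: return True' loop
def petcLoopAdd (a : Int) : List Int → Int → Bool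
  | [], _ => false
  | t :: ts, c =>
    let c' := c + (3 * t + 1)
    if c' = a then true else petcLoopAdd a ts c'

def petc (c : Int) (n : Int) : Bool :=
  let a := pentl (n + 1)
  if c > a then
    petcLoopSub a (3 * (n + 1) + 1) (PySem.List.pyRange 1 c 1) c
  else
    petcLoopAdd a (PySem.List.pyRange 1 c 1) c

-- ===== PORT B =====
-- while lo < hi: mid = (lo+hi)//2; if f(mid) < target: lo = mid+1 else hi = mid
def petcBsearch (target lo hi : Int) : Bool :=
  if h : lo < hi then
    let mid := PySem.Int.floordiv (lo + hi) 2
    if 3 * mid * mid + 5 * mid < target then petcBsearch target (mid + 1) hi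
    else petcBsearch target lo mid
  else
    decide (3 * lo * lo + 5 * lo = target)
termination_by (hi - lo).toNat
decreasing_by
  · have h2 := PySem.Int.floordiv_two_mid_bounds (le_of_lt h)
    omega
  · have h2 := PySem.Int.floordiv_two_mid_bounds (le_of_lt h)
    have h3 : PySem.Int.floordiv (lo + hi) 2 < hi := by
      rw [PySem.Int.floordiv_lt_iff_lt_mul (by norm_num)]; omega
    omega

def petc_alt (c : Int) (n : Int) : Bool :=
  let a := PySem.Int.floordiv ((n + 1) * (3 * n + 2)) 2
  if c > a then
    let d := 3 * n + 4
    let diff := c - a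
    decide (d > 0) && decide (PySem.Int.mod diff d = 0) &&
      decide (PySem.Int.floordiv diff d ≤ c - 1)
  else if c ≤ 1 then false
  else petcBsearch (2 * (a - c)) 1 (c - 1)

-- ===== PRECONDITION & SPEC =====
def Spec_petc (c : Int) (n : Int) (out : Bool) : Prop := out = petc_alt c n
instance (c : Int) (n : Int) (out : Bool) : Decidable (Spec_petc c n out) := by unfold Spec_petc; infer_instance

-- ===== CLAIM (what is proved, stated in full; the proofs are below) =====
def Claim_equal_petc : Prop := ∀ (c : Int) (n : Int), Dom_petc c n → Spec_petc c n (petc c n)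

-- ===== LEMMAS AND PROOFS =====

theorem petcLoopSub_char (a step : Int) : ∀ (ts : List Int) (c : Int),
    petcLoopSub a step ts c = true ↔
      ∃ k : Nat, 1 ≤ k ∧ k ≤ ts.length ∧ c - (k : Int) * step = a := by
  intro ts
  induction ts with
  | nil => intro c; simp [petcLoopSub]
  | cons t ts ih =>
    intro c
    simp only [petcLoopSub, List.length_cons]
    by_cases h : c - step = a
    · rw [if_pos h]
      constructor
      · intro _
        exact ⟨1, le_refl _, by omega, by push_cast; linarith⟩
      · intro _; rfl
    · rw [if_neg h, ih (c - step)]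
      constructor
      · rintro ⟨k, hk1, hk2, hk3⟩
        refine ⟨k + 1, by omega, by omega, ?_⟩
        push_cast
        push_cast at hk3
        linarith
      · rintro ⟨k, hk1, hk2, hk3⟩
        have hk1' : 2 ≤ k := by
          by_contra h2
          have hk : k = 1 := by omega
          subst hk
          apply h
          push_cast at hk3 ⊢
          linarith
        refine ⟨k - 1, by omega, by omega, ?_⟩
        have : ((k - 1 : Nat) : Int) = (k : Int) - 1 := by omega
        rw [this]
        linarith

theorem petcLoopAdd_char (a b : Int) : ∀ (fuel : Nat) (t0 c : Int), (b - t0).toNat = fuel →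
    (petcLoopAdd a (PySem.List.pyRange t0 b 1) c = true ↔
      ∃ m : Int, t0 ≤ m ∧ m < b ∧
        2 * a = 2 * c + 3 * (m * m) + 5 * m - 3 * (t0 * t0) + t0 + 2) := by
  intro fuel
  induction fuel with
  | zero =>
    intro t0 c hf
    rw [PySem.List.pyRange_one_eq_nil (by omega)]
    simp [petcLoopAdd]
    intro m h1 h2
    omega
  | succ fuel ih =>
    intro t0 c hf
    rw [PySem.List.pyRange_one_cons (by omega)]
    simp only [petcLoopAdd]
    by_cases h : c + (3 * t0 + 1) = a
    · rw [if_pos h]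
      constructor
      · intro _
        exact ⟨t0, le_refl _, by omega, by nlinarith⟩
      · intro _; rfl
    · rw [if_neg h, ih (t0 + 1) (c + (3 * t0 + 1)) (by omega)]
      constructor
      · rintro ⟨m, h1, h2, h3⟩
        exact ⟨m, by omega, h2, by nlinarith⟩
      · rintro ⟨m, h1, h2, h3⟩
        have hm : t0 + 1 ≤ m := by
          rcases eq_or_lt_of_le h1 with he | hl
          · exfalso; apply h; subst he; linarith
          · omega
        exact ⟨m, hm, h2, by nlinarith⟩

theorem petc_fmono {x y : Int} (hxy : x < y) (hx : 1 ≤ x) :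
    3 * x * x + 5 * x < 3 * y * y + 5 * y := by nlinarith

theorem petcBsearch_char (target : Int) : ∀ (fuel : Nat) (lo hi : Int),
    (hi - lo).toNat = fuel → 1 ≤ lo → lo ≤ hi →
    (petcBsearch target lo hi = true ↔
      ∃ m : Int, lo ≤ m ∧ m ≤ hi ∧ 3 * m * m + 5 * m = target) := by
  intro fuel
  induction fuel using Nat.strong_induction_on with
  | _ fuel ih =>
    intro lo hi hf h1 hlh
    rw [petcBsearch]
    by_cases h : lo < hi
    · rw [dif_pos h]
      have hmid := PySem.Int.floordiv_two_mid_bounds (le_of_lt h)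
      have hmidlt : PySem.Int.floordiv (lo + hi) 2 < hi := by
        rw [PySem.Int.floordiv_lt_iff_lt_mul (by norm_num)]; omega
      set mid := PySem.Int.floordiv (lo + hi) 2 with hm
      by_cases hcmp : 3 * mid * mid + 5 * mid < target
      · rw [if_pos hcmp,
          ih (hi - (mid + 1)).toNat (by omega) (mid + 1) hi rfl (by omega) (by omega)]
        constructor
        · rintro ⟨m, hm1, hm2, hm3⟩
          exact ⟨m, by omega, hm2, hm3⟩
        · rintro ⟨m, hm1, hm2, hm3⟩
          refine ⟨m, ?_, hm2, hm3⟩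
          by_contra hmle
          push_neg at hmle
          have : 3 * m * m + 5 * m ≤ 3 * mid * mid + 5 * mid := by
            rcases eq_or_lt_of_le (show m ≤ mid by omega) with he | hl
            · exact le_of_eq (by rw [he])
            · exact le_of_lt (petc_fmono hl (by omega))
          omega
      · rw [if_neg hcmp,
          ih (mid - lo).toNat (by omega) lo mid rfl h1 (by omega)]
        constructor
        · rintro ⟨m, hm1, hm2, hm3⟩
          exact ⟨m, hm1, by omega, hm3⟩
        · rintro ⟨m, hm1, hm2, hm3⟩
          refine ⟨m, hm1, ?_, hm3⟩
          by_contra hmgt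
          push_neg at hmgt
          have : 3 * mid * mid + 5 * mid < 3 * m * m + 5 * m :=
            petc_fmono hmgt (by omega)
          omega
    · rw [dif_neg h]
      have hle : lo = hi := by omega
      subst hle
      simp only [decide_eq_true_eq]
      constructor
      · intro he; exact ⟨lo, le_refl _, le_refl _, he⟩
      · rintro ⟨m, hm1, hm2, hm3⟩
        have : m = lo := by omega
        subst this; exact hm3

theorem petc_eq (c n : Int) : petc c n = petc_alt c n := by
  have hpa : pentl (n + 1) = PySem.Int.floordiv ((n + 1) * (3 * n + 2)) 2 := by
    unfold pentl; congr 1; ring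
  simp only [petc, petc_alt, hpa]
  set a := PySem.Int.floordiv ((n + 1) * (3 * n + 2)) 2 with ha
  by_cases hca : c > a
  · rw [if_pos hca, if_pos hca]
    rw [Bool.eq_iff_iff, petcLoopSub_char]
    simp only [PySem.List.length_pyRange_one, Bool.and_eq_true, decide_eq_true_eq]
    constructor
    · rintro ⟨k, hk1, hk2, hk3⟩
      have hkpos : (0 : Int) < (k : Int) := by exact_mod_cast hk1
      have hdiff : (k : Int) * (3 * (n + 1) + 1) = c - a := by linarith
      have hd : (0 : Int) < 3 * n + 4 := by
        by_contra hd0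
        push_neg at hd0
        have hle : (k : Int) * (3 * (n + 1) + 1) ≤ 0 :=
          mul_nonpos_iff.mpr (Or.inl ⟨hkpos.le, by linarith⟩)
        linarith
      have hdvd : c - a = (3 * n + 4) * (k : Int) := by linear_combination -hdiff
      have hfl : PySem.Int.floordiv (c - a) (3 * n + 4) = (k : Int) := by
        rw [PySem.Int.floordiv_eq_ediv_of_pos hd, hdvd,
          Int.mul_ediv_cancel_left _ (ne_of_gt hd)]
      refine ⟨⟨hd, ?_⟩, ?_⟩
      · rw [PySem.Int.mod_eq_zero_iff_dvd]
        exact ⟨(k : Int), hdvd⟩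
      · rw [hfl]; omega
    · rintro ⟨⟨hd, hmod⟩, hq⟩
      rw [PySem.Int.mod_eq_zero_iff_dvd] at hmod
      obtain ⟨k0, hk0⟩ := hmod
      have hk0pos : 0 < k0 := by
        by_contra hk0n
        push_neg at hk0n
        have hle : (3 * n + 4) * k0 ≤ 0 :=
          mul_nonpos_iff.mpr (Or.inl ⟨hd.le, hk0n⟩)
        linarith
      have hfl : PySem.Int.floordiv (c - a) (3 * n + 4) = k0 := by
        rw [PySem.Int.floordiv_eq_ediv_of_pos hd, hk0,
          Int.mul_ediv_cancel_left _ (ne_of_gt hd)]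
      rw [hfl] at hq
      refine ⟨k0.toNat, by omega, by omega, ?_⟩
      rw [Int.toNat_of_nonneg hk0pos.le]
      linear_combination hk0
  · rw [if_neg hca, if_neg hca]
    by_cases hc1 : c ≤ 1
    · rw [if_pos hc1, PySem.List.pyRange_one_eq_nil (by omega)]
      rfl
    · rw [if_neg hc1]
      push_neg at hc1
      rw [Bool.eq_iff_iff,
        petcLoopAdd_char a c (c - 1).toNat 1 c (by omega),
        petcBsearch_char (2 * (a - c)) (c - 1 - 1).toNat 1 (c - 1) rfl (le_refl _)
          (by omega)]
      constructor
      · rintro ⟨m, h1, h2, h3⟩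
        exact ⟨m, h1, by omega, by linarith⟩
      · rintro ⟨m, h1, h2, h3⟩
        exact ⟨m, h1, by omega, by linarith⟩

-- ===== VERDICT (by name: the statement is the Claim_ definition above) =====
theorem petc_spec : Claim_equal_petc := by
  intro c n _
  exact petc_eq c n
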